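-- pv_equiv track=rewrite | github.com/alvarofernandezmota-tech/life-assistant-v4 | src/services/rpg.py | _wyrd_state
-- ===== SOURCE A (Python) =====
-- from typing import Optional, Dict, Any, List
--
-- def _wyrd_state(wyrd: int) -> Dict[str, str]:
--     states = [
--         (80, 100, "CRUZANDO",    "🟢", "Caronte te abre paso."),
--         (50,  79, "A FLOTE",     "🟡", "Navegas, pero la corriente tira."),
--         (30,  49, "A LA DERIVA", "🟠", "El río te arrastra hacia las sombras."),
--         (10,  29, "HUNDIÉNDOTE", "🔴", "Las aguas te reclaman. Actúa ya."),
--         (0,    9, "VAGANDO",     "💀", "100 años sin cruzar. El Lete te espera."),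
--     ]
--     for mn, mx, name, emoji, desc in states:
--         if mn <= wyrd <= mx:
--             return {"name": name, "emoji": emoji, "desc": desc}
--     return {"name": "VAGANDO", "emoji": "💀", "desc": "El Lete te espera."}
-- ===== SOURCE B (Python) =====
-- from bisect import bisect_right
-- from typing import Dict
--
-- _BOUNDS = [0, 10, 30, 50, 80]
-- _STATES = [
--     ("VAGANDO",     "💀", "100 años sin cruzar. El Lete te espera."),
--     ("HUNDIÉNDOTE", "🔴", "Las aguas te reclaman. Actúa ya."),
--     ("A LA DERIVA", "🟠", "El río te arrastra hacia las sombras."),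
--     ("A FLOTE",     "🟡", "Navegas, pero la corriente tira."),
--     ("CRUZANDO",    "🟢", "Caronte te abre paso."),
-- ]
--
-- def _wyrd_state(wyrd: int) -> Dict[str, str]:
--     if wyrd < 0 or wyrd > 100:
--         return {"name": "VAGANDO", "emoji": "💀", "desc": "El Lete te espera."}
--     name, emoji, desc = _STATES[bisect_right(_BOUNDS, wyrd) - 1]
--     return {"name": name, "emoji": emoji, "desc": desc}
-- ===== Notes on version B (the rewrite author's own statement) =====
-- stated objective: idiomatic
-- what changed: Replaces the linear scan over (min,max) range tuples with an out-of-range guard plus a bisect_right lookup over sorted lower bounds into a precomputed state table.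
import Mathlib
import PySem

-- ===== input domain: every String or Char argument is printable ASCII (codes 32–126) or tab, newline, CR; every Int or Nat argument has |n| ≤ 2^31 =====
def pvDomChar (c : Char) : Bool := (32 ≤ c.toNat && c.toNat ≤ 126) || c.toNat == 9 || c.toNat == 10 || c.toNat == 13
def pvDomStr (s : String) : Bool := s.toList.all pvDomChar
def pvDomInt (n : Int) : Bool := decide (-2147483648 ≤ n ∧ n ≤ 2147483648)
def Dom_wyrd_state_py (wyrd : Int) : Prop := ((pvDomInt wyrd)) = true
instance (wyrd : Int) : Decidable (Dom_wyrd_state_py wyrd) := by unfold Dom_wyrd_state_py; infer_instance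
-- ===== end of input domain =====

-- B changes: idiomatic bisect lookup over sorted lower bounds instead of a linear scan of ranges.
-- ===== PORT A =====
def pyAFallback : List (String × String) :=
  [("name", "VAGANDO"), ("emoji", "💀"), ("desc", "El Lete te espera.")]

def pyAStates : List (Int × Int × String × String × String) :=
  [(80, 100, "CRUZANDO",    "🟢", "Caronte te abre paso."),
   (50,  79, "A FLOTE",     "🟡", "Navegas, pero la corriente tira."),
   (30,  49, "A LA DERIVA", "🟠", "El río te arrastra hacia las sombras."),
   (10,  29, "HUNDIÉNDOTE", "🔴", "Las aguas te reclaman. Actúa ya."),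
   (0,    9, "VAGANDO",     "💀", "100 años sin cruzar. El Lete te espera.")]

def pyAScan (wyrd : Int) : List (Int × Int × String × String × String) → List (String × String)
  | [] => pyAFallback
  | (mn, mx, name, emoji, desc) :: rest =>
      if mn ≤ wyrd ∧ wyrd ≤ mx then
        [("name", name), ("emoji", emoji), ("desc", desc)]
      else pyAScan wyrd rest

def wyrd_state_py (wyrd : Int) : List (String × String) := pyAScan wyrd pyAStates

-- ===== PORT B =====
def pyBBounds : List Int := [0, 10, 30, 50, 80]

def pyBStates : List (String × String × String) :=
  [("VAGANDO",     "💀", "100 años sin cruzar. El Lete te espera."),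
   ("HUNDIÉNDOTE", "🔴", "Las aguas te reclaman. Actúa ya."),
   ("A LA DERIVA", "🟠", "El río te arrastra hacia las sombras."),
   ("A FLOTE",     "🟡", "Navegas, pero la corriente tira."),
   ("CRUZANDO",    "🟢", "Caronte te abre paso.")]

-- bisect_right on a sorted list = number of elements ≤ x (exact for sorted input)
def pyBisectRight (xs : List Int) (x : Int) : Nat :=
  xs.foldl (fun acc b => if b ≤ x then acc + 1 else acc) 0

def wyrd_state_py_alt (wyrd : Int) : List (String × String) :=
  if wyrd < 0 ∨ wyrd > 100 then
    [("name", "VAGANDO"), ("emoji", "💀"), ("desc", "El Lete te espera.")]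
  else
    let s := pyBStates.getD (pyBisectRight pyBBounds wyrd - 1) ("", "", "")
    [("name", s.1), ("emoji", s.2.1), ("desc", s.2.2)]

-- ===== PRECONDITION & SPEC =====
def Spec_wyrd_state_py (wyrd : Int) (out : List (String × String)) : Prop := out = wyrd_state_py_alt wyrd
instance (wyrd : Int) (out : List (String × String)) : Decidable (Spec_wyrd_state_py wyrd out) := by unfold Spec_wyrd_state_py; infer_instance

-- ===== CLAIM =====
def Claim_equal_wyrd_state_py : Prop := ∀ (wyrd : Int), Dom_wyrd_state_py wyrd → Spec_wyrd_state_py wyrd (wyrd_state_py wyrd)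

-- ===== LEMMAS AND PROOFS =====

-- ===== VERDICT =====
set_option maxHeartbeats 1000000 in
theorem wyrd_state_py_spec : Claim_equal_wyrd_state_py := by
  intro wyrd _
  unfold Spec_wyrd_state_py
  simp only [wyrd_state_py, wyrd_state_py_alt, pyAScan, pyAStates, pyBStates, pyBBounds,
    pyBisectRight, pyAFallback, List.foldl, List.getD]
  split_ifs <;> first | rfl | omega
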